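-- pv_equiv track=rewrite | github.com/matt-szymczyk/kube2docs | src/kube2docs/phases/image_inspect.py | _parse_alpine_packages
-- ===== SOURCE A (Python) =====
-- def _parse_alpine_packages(content: str) -> list[dict[str, str]]:
--     """Parse Alpine /lib/apk/db/installed into a list of {name, version, description}."""
--     packages: list[dict[str, str]] = []
--     current: dict[str, str] = {}
--     for line in content.splitlines():
--         if line.startswith("P:"):
--             current["name"] = line[2:]
--         elif line.startswith("V:") and "name" in current:
--             current["version"] = line[2:]
--         elif line.startswith("T:") and "name" in current:
--             current["description"] = line[2:]
--         elif line == "" and "name" in current: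
--             packages.append(current)
--             current = {}
--     if "name" in current:
--         packages.append(current)
--     return packages
-- ===== SOURCE B (Python) =====
-- def _parse_alpine_packages(content: str) -> list[dict[str, str]]:
--     """Parse Alpine /lib/apk/db/installed into a list of {name, version, description}."""
--     packages: list[dict[str, str]] = []
--     lines = content.splitlines()
--     n = len(lines)
--     i = 0
--     while i < n:
--         if lines[i] == "":
--             i += 1
--             continue
--         j = i
--         while j < n and lines[j] != "":
--             j += 1
--         d: dict[str, str] = {}
--         for line in lines[i:j]:
--             if line.startswith("P:"):
--                 d["name"] = line[2:]
--             elif line.startswith("V:") and "name" in d: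
--                 d["version"] = line[2:]
--             elif line.startswith("T:") and "name" in d:
--                 d["description"] = line[2:]
--         if "name" in d:
--             packages.append(d)
--         i = j
--     return packages
-- ===== Notes on version B (the rewrite author's own statement) =====
-- stated objective: alternative
-- what changed: B first groups splitlines() output into blocks of consecutive non-empty lines and then parses each block's fields with an inner pass, replacing A's single flat state machine that carries one in-progress dict across the whole line stream.
import Mathlib
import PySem

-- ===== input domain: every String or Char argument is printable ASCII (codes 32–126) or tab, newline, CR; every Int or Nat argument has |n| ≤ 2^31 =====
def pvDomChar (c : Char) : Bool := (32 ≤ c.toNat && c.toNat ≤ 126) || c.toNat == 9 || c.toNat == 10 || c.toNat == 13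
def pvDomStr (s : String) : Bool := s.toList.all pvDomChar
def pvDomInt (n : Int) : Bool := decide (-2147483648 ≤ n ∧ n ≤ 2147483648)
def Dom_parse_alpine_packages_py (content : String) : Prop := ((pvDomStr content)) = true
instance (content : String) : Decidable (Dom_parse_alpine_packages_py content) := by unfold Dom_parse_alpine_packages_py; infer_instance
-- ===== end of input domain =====

-- B replaces A's flat state machine (carry-over `current` dict) with a two-level decomposition:
-- group the lines into blocks of consecutive non-empty lines, then parse each block's fields. Same cost; objective: alternative.

-- ===== PORT A =====
-- the loop body of A's single for-loop over splitlines(), state = (packages, current)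
def pvStepA (st : List (List (String × String)) × PySem.Dict String String) (line : String) :
    List (List (String × String)) × PySem.Dict String String :=
  if PySem.Str.startswith line "P:" then
    (st.1, st.2.insert "name" (PySem.Str.slice line (some 2) none))
  else if PySem.Str.startswith line "V:" && st.2.contains "name" then
    (st.1, st.2.insert "version" (PySem.Str.slice line (some 2) none))
  else if PySem.Str.startswith line "T:" && st.2.contains "name" then
    (st.1, st.2.insert "description" (PySem.Str.slice line (some 2) none))
  else if line == "" && st.2.contains "name" then
    (st.1 ++ [st.2.items], PySem.Dict.empty)
  else st

def parse_alpine_packages_py (content : String) : List (List (String × String)) :=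
  let st := (PySem.Str.splitlines content).foldl pvStepA ([], PySem.Dict.empty)
  if st.2.contains "name" then st.1 ++ [st.2.items] else st.1

-- ===== PORT B =====
-- B's inner for-loop body: parse one field line of a block into the block's dict
def pvField (d : PySem.Dict String String) (line : String) : PySem.Dict String String :=
  if PySem.Str.startswith line "P:" then
    d.insert "name" (PySem.Str.slice line (some 2) none)
  else if PySem.Str.startswith line "V:" && d.contains "name" then
    d.insert "version" (PySem.Str.slice line (some 2) none)
  else if PySem.Str.startswith line "T:" && d.contains "name" then
    d.insert "description" (PySem.Str.slice line (some 2) none)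
  else d

-- B's outer while-loop: split the line list into maximal runs of non-empty lines
def pvBlocks : List String → List (List String)
  | [] => []
  | l :: ls =>
    if l = "" then pvBlocks ls
    else (l :: ls.takeWhile (· ≠ "")) :: pvBlocks (ls.dropWhile (· ≠ ""))
termination_by ls => ls.length
decreasing_by
  · simp
  · exact Nat.lt_succ_of_le (List.length_dropWhile_le _ _)

-- parse one block; keep it only if it yielded a name
def pvParseBlock (b : List String) : Option (List (String × String)) :=
  let d := b.foldl pvField PySem.Dict.empty
  if d.contains "name" then some d.items else none

def parse_alpine_packages_py_alt (content : String) : List (List (String × String)) :=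
  (pvBlocks (PySem.Str.splitlines content)).filterMap pvParseBlock

-- ===== PRECONDITION & SPEC =====
def Spec_parse_alpine_packages_py (content : String) (out : List (List (String × String))) : Prop := out = parse_alpine_packages_py_alt content
instance (content : String) (out : List (List (String × String))) : Decidable (Spec_parse_alpine_packages_py content out) := by unfold Spec_parse_alpine_packages_py; infer_instance

-- ===== CLAIM (what is proved, stated in full; the proofs are below) =====
def Claim_equal_parse_alpine_packages_py : Prop := ∀ (content : String), Dom_parse_alpine_packages_py content → Spec_parse_alpine_packages_py content (parse_alpine_packages_py content)

-- ===== LEMMAS AND PROOFS =====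

-- A's final flush, as a function of the loop state
def pvFinish (st : List (List (String × String)) × PySem.Dict String String) :
    List (List (String × String)) :=
  if st.2.contains "name" then st.1 ++ [st.2.items] else st.1

lemma pvField_keeps_name (d : PySem.Dict String String) (l : String)
    (h : d.contains "name" = true) : (pvField d l).contains "name" = true := by
  unfold pvField
  split_ifs <;> simp [PySem.Dict.contains_insert, h]

lemma pvFold_keeps_name (b : List String) (d : PySem.Dict String String)
    (h : d.contains "name" = true) : (b.foldl pvField d).contains "name" = true := by
  induction b generalizing d with
  | nil => exact h
  | cons l b ih => exact ih _ (pvField_keeps_name d l h)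

lemma pvFold_trivial_or_name (b : List String) (d : PySem.Dict String String) :
    b.foldl pvField d = d ∨ (b.foldl pvField d).contains "name" = true := by
  induction b generalizing d with
  | nil => exact Or.inl rfl
  | cons l b ih =>
    have hstep : pvField d l = d ∨ (pvField d l).contains "name" = true := by
      unfold pvField
      split_ifs with h1 h2 h3
      · right; exact PySem.Dict.contains_insert_self _ _ _
      · right
        have := (Bool.and_eq_true _ _).mp h2
        simp [PySem.Dict.contains_insert, this.2]
      · right
        have := (Bool.and_eq_true _ _).mp h3
        simp [PySem.Dict.contains_insert, this.2]
      · exact Or.inl rfl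
    rcases hstep with h | h
    · rw [List.foldl_cons, h]; exact ih d
    · right; rw [List.foldl_cons]; exact pvFold_keeps_name b _ h

lemma pvFold_empty_of_no_name (b : List String)
    (h : (b.foldl pvField PySem.Dict.empty).contains "name" = false) :
    b.foldl pvField PySem.Dict.empty = PySem.Dict.empty := by
  rcases pvFold_trivial_or_name b PySem.Dict.empty with h' | h'
  · exact h'
  · rw [h'] at h; cases h

lemma pvStepA_eq_field (st : List (List (String × String)) × PySem.Dict String String)
    (l : String) (hl : l ≠ "") : pvStepA st l = (st.1, pvField st.2 l) := by
  unfold pvStepA pvField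
  have : (l == "") = false := by simpa using hl
  split_ifs <;> simp_all

lemma pvFold_nonempty (b : List String) (h : ∀ l ∈ b, l ≠ "")
    (pkgs : List (List (String × String))) (d : PySem.Dict String String) :
    b.foldl pvStepA (pkgs, d) = (pkgs, b.foldl pvField d) := by
  induction b generalizing d with
  | nil => rfl
  | cons l b ih =>
    rw [List.foldl_cons, List.foldl_cons,
      pvStepA_eq_field (pkgs, d) l (h l (List.mem_cons_self ..))]
    exact ih (fun x hx => h x (List.mem_cons_of_mem _ hx)) _

lemma pvStepA_empty_line (pkgs : List (List (String × String)))
    (d : PySem.Dict String String) :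
    pvStepA (pkgs, d) "" =
      if d.contains "name" then (pkgs ++ [d.items], PySem.Dict.empty) else (pkgs, d) := by
  unfold pvStepA
  have h1 : PySem.Chars.startswith ([] : List Char) ['P', ':'] = false := by decide
  have h2 : PySem.Chars.startswith ([] : List Char) ['V', ':'] = false := by decide
  have h3 : PySem.Chars.startswith ([] : List Char) ['T', ':'] = false := by decide
  simp [h1, h2, h3]

lemma pvDropWhile_head_empty (ls : List String) (r : String) (rest : List String)
    (h : ls.dropWhile (· ≠ "") = r :: rest) : r = "" := by
  induction ls with
  | nil => cases h
  | cons x ls ih =>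
    rw [List.dropWhile_cons] at h
    split_ifs at h with hx
    · exact ih h
    · simp at hx; rw [← hx]; exact (List.cons.injEq ..).mp h |>.1.symm

-- main loop correspondence: A's run over a tail of the line list, starting from a
-- fresh current dict, yields exactly B's block-decomposed result appended to pkgs
theorem pvMain (ls : List String) (pkgs : List (List (String × String))) :
    pvFinish (ls.foldl pvStepA (pkgs, PySem.Dict.empty)) = pkgs ++ (pvBlocks ls).filterMap pvParseBlock := by
  match ls with
  | [] => simp [pvFinish, pvBlocks, PySem.Dict.contains_empty]
  | l :: ls' =>
    by_cases hl : l = ""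
    · subst hl
      rw [List.foldl_cons, pvStepA_empty_line, if_neg (by simp [PySem.Dict.contains_empty])]
      rw [show pvBlocks ("" :: ls') = pvBlocks ls' by rw [pvBlocks]; simp]
      exact pvMain ls' pkgs
    · have hsplit : ls' = ls'.takeWhile (· ≠ "") ++ ls'.dropWhile (· ≠ "") :=
        (List.takeWhile_append_dropWhile ..).symm
      have hb : ∀ x ∈ l :: ls'.takeWhile (· ≠ ""), x ≠ "" := by
        intro x hx
        rcases List.mem_cons.mp hx with h | h
        · rwa [h]
        · simpa using List.mem_takeWhile_imp h
      have hfold : (l :: ls').foldl pvStepA (pkgs, PySem.Dict.empty) =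
          (ls'.dropWhile (· ≠ "")).foldl pvStepA
            (pkgs, (l :: ls'.takeWhile (· ≠ "")).foldl pvField PySem.Dict.empty) := by
        conv_lhs => rw [show (l :: ls') = (l :: ls'.takeWhile (· ≠ "")) ++ ls'.dropWhile (· ≠ "") by
          rw [List.cons_append]; exact congrArg (l :: ·) hsplit]
        rw [List.foldl_append, pvFold_nonempty _ hb]
      set d := (l :: ls'.takeWhile (· ≠ "")).foldl pvField PySem.Dict.empty with hd
      have hblocks : pvBlocks (l :: ls') =
          (l :: ls'.takeWhile (· ≠ "")) :: pvBlocks (ls'.dropWhile (· ≠ "")) := by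
        rw [pvBlocks, if_neg hl]
      cases hrest : ls'.dropWhile (· ≠ "") with
      | nil =>
        rw [hfold, hrest, List.foldl_nil, hblocks, hrest]
        unfold pvFinish pvParseBlock
        rw [show pvBlocks ([] : List String) = [] by simp [pvBlocks]]
        simp only [List.filterMap_cons, List.filterMap_nil, ← hd]
        by_cases hn : d.contains "name" = true <;> simp [hn]
      | cons r rest' =>
        have hr : r = "" := pvDropWhile_head_empty ls' r rest' hrest
        subst hr
        rw [hfold, hrest, List.foldl_cons, pvStepA_empty_line]
        by_cases hn : d.contains "name" = true
        · rw [if_pos hn, pvMain rest' (pkgs ++ [d.items]), hblocks, hrest]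
          rw [show pvBlocks ("" :: rest') = pvBlocks rest' by rw [pvBlocks, if_pos rfl]]
          rw [List.filterMap_cons, show pvParseBlock (l :: ls'.takeWhile (· ≠ "")) = some d.items by
            simp only [pvParseBlock, ← hd, hn, if_pos]]
          simp
        · rw [if_neg hn]
          have hde : d = PySem.Dict.empty :=
            pvFold_empty_of_no_name _ (Bool.eq_false_iff.mpr hn)
          rw [hde, pvMain rest' pkgs, hblocks, hrest]
          rw [show pvBlocks ("" :: rest') = pvBlocks rest' by rw [pvBlocks, if_pos rfl]]
          rw [List.filterMap_cons, show pvParseBlock (l :: ls'.takeWhile (· ≠ "")) = none by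
            simp only [pvParseBlock, ← hd, hde]
            simp [PySem.Dict.contains_empty]]
termination_by ls.length
decreasing_by
  all_goals simp only [List.length_cons]
  all_goals
    first
    | omega
    | (have hle := List.length_dropWhile_le (fun x => decide (x ≠ "")) ls'
       rw [hrest] at hle
       simp at hle
       omega)

-- ===== VERDICT (by name: the statement is the Claim_ definition above) =====
theorem parse_alpine_packages_py_spec : Claim_equal_parse_alpine_packages_py := by
  intro content _
  unfold Spec_parse_alpine_packages_py parse_alpine_packages_py parse_alpine_packages_py_alt
  have := pvMain (PySem.Str.splitlines content) []
  unfold pvFinish at this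
  simpa using this
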